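-- pv_equiv track=rewrite | github.com/xupeng211/FootballPrediction | scripts/archive/syntax_fixers/fix_test_syntax.py | fix_import_statements
-- ===== SOURCE A (Python) =====
-- from typing import List, Dict, Tuple, Optional
--
-- def fix_import_statements(content: str) -> Tuple[str, List[str]]:
--     """Fix import statement issues"""
--     lines = content.split("\n")
--     fixes = []
--
--     # Group consecutive imports
--     i = 0
--     while i < len(lines):
--         line = lines[i].strip()
--         if line.startswith("import ") or line.startswith("from "):
--             # Find all consecutive imports
--             import_block = [i]
--             j = i + 1
--             while j < len(lines) and (
--                 lines[j].strip().startswith("import ") or lines[j].strip().startswith("from ")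
--             ):
--                 import_block.append(j)
--                 j += 1
--
--             # Sort imports if they're not already sorted
--             if len(import_block) > 1:
--                 imports = [lines[k] for k in import_block]
--                 sorted_imports = sorted(imports, key=lambda x: x.strip())
--                 if imports != sorted_imports:
--                     for k, idx in enumerate(import_block):
--                         lines[idx] = sorted_imports[k]
--                     fixes.append(f"Sorted imports at lines {i + 1}-{j}")
--
--             i = j
--         else:
--             i += 1
--
--     return "\n".join(lines), fixes
-- ===== SOURCE B (Python) =====
-- def _flush(out, block, fixes, end):
--     """Emit a finished run of consecutive import lines ending just before index `end`."""
--     if len(block) > 1: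
--         srt = sorted(block, key=str.strip)
--         if srt != block:
--             fixes.append(f"Sorted imports at lines {end - len(block) + 1}-{end}")
--             out.extend(srt)
--             return
--     out.extend(block)
--
-- def fix_import_statements(content):
--     lines = content.split("\n")
--     out, block, fixes = [], [], []
--     for idx, line in enumerate(lines):
--         s = line.strip()
--         if s.startswith("import ") or s.startswith("from "):
--             block.append(line)
--         else:
--             _flush(out, block, fixes, idx)
--             block = []
--             out.append(line)
--     _flush(out, block, fixes, len(lines))
--     return "\n".join(out), fixes
-- ===== Notes on version B (the rewrite author's own statement) =====
-- stated objective: alternative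
-- what changed: Replaced A's index-based while-loop with inner scan-ahead and in-place write-back over a mutable list by a single forward pass over enumerate(lines) that buffers the current run of import lines in an accumulator and flushes it (sorting if needed) at each non-import line and once at end of file, building the output list afresh.
import Mathlib
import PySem

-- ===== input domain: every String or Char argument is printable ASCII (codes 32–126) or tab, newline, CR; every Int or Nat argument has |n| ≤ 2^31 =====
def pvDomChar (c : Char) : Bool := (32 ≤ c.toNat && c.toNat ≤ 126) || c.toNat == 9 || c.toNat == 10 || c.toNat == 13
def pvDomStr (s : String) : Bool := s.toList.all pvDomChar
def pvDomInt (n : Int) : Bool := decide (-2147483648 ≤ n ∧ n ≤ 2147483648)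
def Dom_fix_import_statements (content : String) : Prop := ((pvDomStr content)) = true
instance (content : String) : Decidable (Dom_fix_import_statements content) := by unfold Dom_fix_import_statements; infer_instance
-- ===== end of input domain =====

-- B replaces A's index-based scan-ahead loop with in-place write-back by a single
-- accumulator-and-flush pass building a fresh output list (alternative decomposition, same cost).


-- ===== PORT A =====
-- inner while: collect indices of consecutive import lines starting at j
def fixA_inner (lines : List String) (j : Nat) (blk : List Nat) : List Nat × Nat :=
  if _h : j < lines.length ∧
      (PySem.Str.startswith (PySem.Str.strip (lines.getD j "")) "import " ||
       PySem.Str.startswith (PySem.Str.strip (lines.getD j "")) "from ") = true then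
    fixA_inner lines (j + 1) (blk ++ [j])
  else (blk, j)
termination_by lines.length - j

theorem fixA_inner_ge (lines : List String) (j : Nat) (blk : List Nat) :
    j ≤ (fixA_inner lines j blk).2 := by
  fun_induction fixA_inner with
  | case1 h ih => omega
  | case2 h => simp

theorem length_foldl_set (ps : List (Nat × String)) (ls : List String) :
    (ps.foldl (fun acc p => acc.set p.1 p.2) ls).length = ls.length := by
  induction ps generalizing ls with
  | nil => rfl
  | cons p ps ih => simpa [List.foldl] using ih (ls.set p.1 p.2)

-- block-processing body of the outer loop: sort-and-write-back if needed
def fixA_update (lines fixes : List String) (i : Nat) (blk : List Nat) (j : Nat) :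
    List String × List String :=
  if blk.length > 1 then
    let imports := blk.map (fun k => lines.getD k "")
    let sortedImports := PySem.List.sorted imports (fun x => PySem.Str.strip x)
    if imports ≠ sortedImports then
      ((blk.zip sortedImports).foldl (fun acc p => acc.set p.1 p.2) lines,
       fixes ++ ["Sorted imports at lines " ++ PySem.Int.toStr ((i : Int) + 1) ++ "-" ++
         PySem.Int.toStr (j : Int)])
    else (lines, fixes)
  else (lines, fixes)

theorem length_fixA_update (lines fixes : List String) (i : Nat) (blk : List Nat) (j : Nat) :
    (fixA_update lines fixes i blk j).1.length = lines.length := by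
  unfold fixA_update
  split
  · dsimp only
    split
    · exact length_foldl_set _ _
    · rfl
  · rfl

-- outer while over index i into the (mutable) lines list
def fixA_loop (lines : List String) (i : Nat) (fixes : List String) :
    List String × List String :=
  if hi : i < lines.length then
    let line := PySem.Str.strip (lines.getD i "")
    if (PySem.Str.startswith line "import " || PySem.Str.startswith line "from ") then
      let bj := fixA_inner lines (i + 1) [i]
      let lf := fixA_update lines fixes i bj.1 bj.2
      fixA_loop lf.1 bj.2 lf.2
    else fixA_loop lines (i + 1) fixes
  else (lines, fixes)
termination_by lines.length - i
decreasing_by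
  · have h1 : i + 1 ≤ (fixA_inner lines (i + 1) [i]).2 := fixA_inner_ge lines (i + 1) [i]
    have h2 := length_fixA_update lines fixes i (fixA_inner lines (i + 1) [i]).1
      (fixA_inner lines (i + 1) [i]).2
    omega
  · omega

def fix_import_statements (content : String) : String × List String :=
  -- content.split("\n"): sep is the nonempty literal, so split? is always some
  let lines := (PySem.Str.split? content "\n").getD []
  let r := fixA_loop lines 0 []
  (PySem.Str.join "\n" r.1, r.2)

-- ===== PORT B =====
-- flush a finished run of consecutive import lines ending just before index endIdx
def fixB_flush (out blk fixes : List String) (endIdx : Int) : List String × List String :=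
  if blk.length > 1 then
    let srt := PySem.List.sorted blk (fun x => PySem.Str.strip x)
    if srt ≠ blk then
      (out ++ srt,
       fixes ++ ["Sorted imports at lines " ++ PySem.Int.toStr (endIdx - blk.length + 1) ++ "-" ++
         PySem.Int.toStr endIdx])
    else (out ++ blk, fixes)
  else (out ++ blk, fixes)

-- one step of B's single forward pass: buffer import lines, flush at a non-import line
def fixB_step (st : List String × List String × List String) (p : Int × String) :
    List String × List String × List String :=
  let s := PySem.Str.strip p.2
  if (PySem.Str.startswith s "import " || PySem.Str.startswith s "from ") then
    (st.1, st.2.1 ++ [p.2], st.2.2)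
  else
    let of := fixB_flush st.1 st.2.1 st.2.2 p.1
    (of.1 ++ [p.2], [], of.2)

def fix_import_statements_alt (content : String) : String × List String :=
  -- content.split("\n"): sep is the nonempty literal, so split? is always some
  let lines := (PySem.Str.split? content "\n").getD []
  let st := (PySem.List.enumerate lines).foldl fixB_step ([], [], [])
  let fin := fixB_flush st.1 st.2.1 st.2.2 (lines.length : Int)
  (PySem.Str.join "\n" fin.1, fin.2)

-- ===== PRECONDITION & SPEC =====
def Spec_fix_import_statements (content : String) (out : String × List String) : Prop := out = fix_import_statements_alt content
instance (content : String) (out : String × List String) : Decidable (Spec_fix_import_statements content out) := by unfold Spec_fix_import_statements; infer_instance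

-- ===== CLAIM (what is proved, stated in full; the proofs are below) =====
def Claim_equal_fix_import_statements : Prop := ∀ (content : String), Dom_fix_import_statements content → Spec_fix_import_statements content (fix_import_statements content)

-- ===== LEMMAS AND PROOFS =====

-- the import-line predicate both programs test
def pvImp (l : String) : Bool :=
  PySem.Str.startswith (PySem.Str.strip l) "import " ||
  PySem.Str.startswith (PySem.Str.strip l) "from "

def pvMsg (i j : Nat) : String :=
  "Sorted imports at lines " ++ PySem.Int.toStr ((i : Int) + 1) ++ "-" ++ PySem.Int.toStr (j : Int)

-- reference block decomposition both ports are proved against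
def pvSpec : List String → Nat → List String × List String
  | [], _ => ([], [])
  | x :: rest, i =>
    if pvImp x then
      let blk := x :: rest.takeWhile pvImp
      let r := rest.dropWhile pvImp
      let r2 := pvSpec r (i + blk.length)
      if blk.length > 1 then
        let srt := PySem.List.sorted blk (fun y => PySem.Str.strip y)
        if blk ≠ srt then (srt ++ r2.1, pvMsg i (i + blk.length) :: r2.2)
        else (blk ++ r2.1, r2.2)
      else (blk ++ r2.1, r2.2)
    else
      let r2 := pvSpec rest (i + 1)
      (x :: r2.1, r2.2)
termination_by ls _ => ls.length
decreasing_by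
  · have := List.length_dropWhile_le (p := pvImp) (l := rest); simpa using Nat.lt_succ_of_le this
  · simp

-- what flushing one block contributes (output lines, fix messages)
def pvFlush (blk : List String) (i : Nat) : List String × List String :=
  if blk.length > 1 then
    if blk ≠ PySem.List.sorted blk (fun y => PySem.Str.strip y) then
      (PySem.List.sorted blk (fun y => PySem.Str.strip y), [pvMsg i (i + blk.length)])
    else (blk, [])
  else (blk, [])

theorem pvSpec_nil (i : Nat) : pvSpec [] i = ([], []) := by simp [pvSpec]

theorem pvSpec_cons_not (x : String) (rest : List String) (i : Nat) (hx : pvImp x = false) :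
    pvSpec (x :: rest) i = ((x :: (pvSpec rest (i + 1)).1, (pvSpec rest (i + 1)).2)) := by
  rw [pvSpec]
  simp [hx]

theorem pvSpec_cons_imp (x : String) (rest : List String) (i : Nat) (hx : pvImp x = true) :
    pvSpec (x :: rest) i =
      ((pvFlush (x :: rest.takeWhile pvImp) i).1 ++
          (pvSpec (rest.dropWhile pvImp) (i + (x :: rest.takeWhile pvImp).length)).1,
        (pvFlush (x :: rest.takeWhile pvImp) i).2 ++
          (pvSpec (rest.dropWhile pvImp) (i + (x :: rest.takeWhile pvImp).length)).2) := by
  rw [pvSpec]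
  simp only [hx, if_true, pvFlush]
  split_ifs <;> simp

theorem takeWhile_length_le {α : Type} (p : α → Bool) (l : List α) :
    (l.takeWhile p).length ≤ l.length := by
  induction l with
  | nil => simp
  | cons a l ih =>
    by_cases h : p a
    · simpa [List.takeWhile_cons, h] using Nat.succ_le_succ ih
    · simp [List.takeWhile_cons, h]

theorem takeWhile_eq_take {α : Type} (p : α → Bool) (l : List α) :
    l.takeWhile p = l.take ((l.takeWhile p).length) := by
  induction l with
  | nil => simp
  | cons a l ih =>
    by_cases h : p a
    · rw [List.takeWhile_cons_of_pos h, List.length_cons, List.take_succ_cons, ← ih]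
    · rw [List.takeWhile_cons_of_neg (by simp [h]), List.length_nil, List.take_zero]

theorem dropWhile_eq_drop {α : Type} (p : α → Bool) (l : List α) :
    l.dropWhile p = l.drop ((l.takeWhile p).length) := by
  induction l with
  | nil => simp
  | cons a l ih =>
    by_cases h : p a
    · simp [List.takeWhile_cons, List.dropWhile_cons, h, ih]
    · simp [List.takeWhile_cons, List.dropWhile_cons, h]

theorem dropWhile_head_false {α : Type} (p : α → Bool) (l : List α) (y : α) (ys : List α)
    (h : l.dropWhile p = y :: ys) : p y = false := by
  induction l with
  | nil => simp at h
  | cons a l ih =>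
    by_cases ha : p a
    · exact ih (by simpa [List.dropWhile_cons, ha] using h)
    · rw [List.dropWhile_cons, if_neg (by simp [ha])] at h
      cases h
      simpa using ha

theorem fixA_inner_eq (lines : List String) (j : Nat) (blk : List Nat) :
    fixA_inner lines j blk =
      (blk ++ List.range' j ((lines.drop j).takeWhile pvImp).length,
       j + ((lines.drop j).takeWhile pvImp).length) := by
  fun_induction fixA_inner with
  | case1 j blk h ih =>
    obtain ⟨hj, hc⟩ := h
    have hget : lines.getD j "" = lines[j] := List.getD_eq_getElem _ _ hj
    have hdrop : lines.drop j = lines[j] :: lines.drop (j + 1) := List.drop_eq_getElem_cons hj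
    have himp : pvImp lines[j] = true := by rw [pvImp, ← hget]; exact hc
    rw [ih, hdrop, List.takeWhile_cons_of_pos himp, List.length_cons, List.range'_succ]
    simp
    omega
  | case2 j blk h =>
    rw [not_and_or] at h
    rcases h with h | h
    · have : lines.drop j = [] := List.drop_eq_nil_of_le (by omega)
      simp [this]
    · rcases hd : lines.drop j with _ | ⟨y, ys⟩
      · simp
      · have hj : j < lines.length := by
          by_contra hc
          rw [List.drop_eq_nil_of_le (by omega)] at hd; cases hd
        have hy : y = lines[j] := by
          have := List.drop_eq_getElem_cons hj
          rw [hd] at this; exact (List.cons.injEq .. ▸ this).1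
        have himp : pvImp y = false := by
          rw [hy, pvImp]
          have hget : lines.getD j "" = lines[j] := List.getD_eq_getElem _ _ hj
          rw [← hget]
          simpa using h
        rw [List.takeWhile_cons_of_neg (by simp [himp])]
        simp
theorem map_getD_range' (lines : List String) (n : Nat) :
    ∀ j : Nat, j + n ≤ lines.length →
      (List.range' j n).map (fun k => lines.getD k "") = (lines.drop j).take n := by
  induction n with
  | zero => intro j _; simp
  | succ n ih =>
    intro j hj
    have hjl : j < lines.length := by omega
    rw [List.range'_succ, List.map_cons, ih (j + 1) (by omega),
      List.drop_eq_getElem_cons hjl, List.take_succ_cons, List.getD_eq_getElem _ _ hjl]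

theorem foldl_set_zip (vs : List String) :
    ∀ (lines : List String) (j : Nat), j + vs.length ≤ lines.length →
      ((List.range' j vs.length).zip vs).foldl (fun acc p => acc.set p.1 p.2) lines =
        lines.take j ++ vs ++ lines.drop (j + vs.length) := by
  induction vs with
  | nil => intro lines j _; simp
  | cons v vs ih =>
    intro lines j hj
    simp only [List.length_cons] at hj
    have hjl : j < lines.length := by omega
    rw [List.length_cons, List.range'_succ, List.zip_cons_cons, List.foldl_cons]
    have hlen : (lines.set j v).length = lines.length := by simp
    rw [ih (lines.set j v) (j + 1) (by rw [hlen]; omega)]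
    have hset : lines.set j v = lines.take j ++ v :: lines.drop (j + 1) := by
      rw [List.set_eq_take_append_cons_drop, if_pos hjl]
    rw [hset]
    have hA : (lines.take j).length = j := by simp; omega
    rw [List.take_append, List.drop_append, hA]
    have h0 : List.drop (j + 1 + vs.length) (List.take j lines) = [] :=
      List.drop_eq_nil_of_le (by rw [hA]; omega)
    have h2 : List.take (j + 1) (List.take j lines) = List.take j lines :=
      List.take_of_length_le (by rw [hA]; omega)
    rw [h0, h2, show j + 1 + vs.length - j = vs.length + 1 from by omega,
      show j + 1 - j = 1 from by omega, List.drop_succ_cons, List.drop_drop]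
    rw [show j + 1 + vs.length = j + (vs.length + 1) from by omega]
    simp


set_option maxHeartbeats 1000000 in
theorem fixA_loop_eq (lines : List String) (i : Nat) (fixes : List String) :
      fixA_loop lines i fixes =
        (lines.take i ++ (pvSpec (lines.drop i) i).1, fixes ++ (pvSpec (lines.drop i) i).2) := by
  fun_induction fixA_loop with
  | case1 lines i fixes hi line hcond bj lf ih =>
    have himp : pvImp (lines.getD i "") = true := hcond
    have hx : lines.getD i "" = lines[i] := List.getD_eq_getElem _ _ hi
    rw [hx] at himp
    set t := ((lines.drop (i + 1)).takeWhile pvImp).length with ht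
    have hderiv : bj = (List.range' i (t + 1), i + 1 + t) := by
      show fixA_inner lines (i + 1) [i] = _
      rw [fixA_inner_eq, List.range'_succ]
      simp
      exact ht.symm
    have hlf : lf = fixA_update lines fixes i (List.range' i (t + 1)) (i + 1 + t) := by
      show fixA_update lines fixes i bj.1 bj.2 = _
      rw [hderiv]
    have h1 := takeWhile_length_le pvImp (lines.drop (i + 1))
    have htle : i + 1 + t ≤ lines.length := by
      have h2 : (lines.drop (i + 1)).length = lines.length - (i + 1) := List.length_drop
      omega
    have hdropi : lines.drop i = lines[i] :: lines.drop (i + 1) := List.drop_eq_getElem_cons hi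
    have htake_t : (lines.drop (i + 1)).take t = (lines.drop (i + 1)).takeWhile pvImp :=
      (ht ▸ takeWhile_eq_take pvImp (lines.drop (i + 1))).symm
    set B := lines[i] :: (lines.drop (i + 1)).takeWhile pvImp with hB
    have hBlen : B.length = t + 1 := by simp [hB, ht]
    have himports : (List.range' i (t + 1)).map (fun k => lines.getD k "") = B := by
      rw [map_getD_range' lines (t + 1) i (by omega), hdropi, List.take_succ_cons, htake_t]
    have hR : (lines.drop (i + 1)).dropWhile pvImp = lines.drop (i + 1 + t) := by
      rw [dropWhile_eq_drop, ← ht, List.drop_drop]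
    have hspec : pvSpec (lines.drop i) i =
        ((pvFlush B i).1 ++ (pvSpec (lines.drop (i + 1 + t)) (i + 1 + t)).1,
         (pvFlush B i).2 ++ (pvSpec (lines.drop (i + 1 + t)) (i + 1 + t)).2) := by
      rw [hdropi, pvSpec_cons_imp _ _ _ himp, ← hB, hR, hBlen,
        show i + (t + 1) = i + 1 + t from by omega]
    have htake : lines.take (i + 1 + t) = lines.take i ++ B := by
      rw [show i + 1 + t = i + (t + 1) from by omega, List.take_add, hdropi,
        List.take_succ_cons, htake_t]
    rw [ih, hlf, hderiv, hspec]
    dsimp only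
    rw [fixA_update]
    simp only [himports, List.length_range']
    by_cases ht0 : t = 0
    · rw [if_neg (by omega)]
      have hfl : pvFlush B i = (B, []) := by rw [pvFlush, if_neg (by omega)]
      rw [hfl]
      simp only [htake, List.append_assoc, List.nil_append, List.append_nil]
    · rw [if_pos (by omega)]
      by_cases hsort : B ≠ PySem.List.sorted B (fun x => PySem.Str.strip x)
      · rw [if_pos hsort]
        have hfl : pvFlush B i =
            (PySem.List.sorted B (fun y => PySem.Str.strip y),
             [pvMsg i (i + B.length)]) := by
          rw [pvFlush, if_pos (by omega), if_pos hsort]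
        set S := PySem.List.sorted B (fun x => PySem.Str.strip x) with hSdef
        have hSlen : S.length = t + 1 := by
          rw [hSdef, PySem.List.length_sorted, hBlen]
        have hzip : (List.range' i (t + 1)).zip S = (List.range' i S.length).zip S := by
          rw [hSlen]
        dsimp only
        rw [hzip, foldl_set_zip S lines i (by omega)]
        set P := lines.take i ++ S ++ lines.drop (i + S.length) with hPdef
        have hti : (lines.take i).length = i := by simp; omega
        have htP : P.take (i + 1 + t) = lines.take i ++ S := by
          rw [hPdef, List.append_assoc, List.take_append, hti,
            List.take_of_length_le (i := i + 1 + t) (by rw [hti]; omega),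
            show i + 1 + t - i = t + 1 from by omega,
            List.take_append, List.take_of_length_le (i := t + 1) (by rw [hSlen]),
            hSlen, show t + 1 - (t + 1) = 0 from by omega]
          simp
        have hdP : P.drop (i + 1 + t) = lines.drop (i + 1 + t) := by
          rw [hPdef, List.append_assoc, List.drop_append, hti,
            List.drop_eq_nil_of_le (i := i + 1 + t) (by rw [hti]; omega),
            show i + 1 + t - i = t + 1 from by omega,
            List.drop_append, List.drop_eq_nil_of_le (i := t + 1) (by rw [hSlen]),
            hSlen, show t + 1 - (t + 1) = 0 from by omega, List.drop_drop]
          rw [show i + (t + 1) + 0 = i + 1 + t from by omega]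
          simp
        rw [htP, hdP, hfl, hBlen,
          show i + (t + 1) = i + 1 + t from by omega]
        simp only [pvMsg, List.append_assoc, List.singleton_append, List.cons_append,
          List.nil_append]
      · rw [if_neg hsort]
        have hfl : pvFlush B i = (B, []) := by
          rw [pvFlush, if_pos (by omega), if_neg hsort]
        rw [hfl]
        simp only [htake, List.append_assoc, List.nil_append, List.append_nil]
  | case2 lines i fixes hi line hcond ih =>
    have himp : pvImp (lines.getD i "") = false := eq_false_of_ne_true hcond
    have hx : lines.getD i "" = lines[i] := List.getD_eq_getElem _ _ hi
    rw [hx] at himp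
    have hdropi : lines.drop i = lines[i] :: lines.drop (i + 1) := List.drop_eq_getElem_cons hi
    rw [ih, hdropi, pvSpec_cons_not _ _ _ himp]
    have htake : lines.take (i + 1) = lines.take i ++ [lines[i]] := by
      rw [show i + 1 = i + (1 : Nat) from rfl, List.take_add, hdropi, List.take_succ_cons,
        List.take_zero]
    simp only [htake, List.append_assoc, List.cons_append, List.nil_append]
  | case3 lines i fixes hi =>
    have hlen : lines.length ≤ i := by omega
    rw [List.drop_eq_nil_of_le hlen, pvSpec_nil]
    simp [List.take_of_length_le hlen]
theorem fixB_step_imp (st : List String × List String × List String) (k : Int) (b : String)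
    (hb : pvImp b = true) : fixB_step st (k, b) = (st.1, st.2.1 ++ [b], st.2.2) := by
  unfold pvImp at hb
  rw [fixB_step]
  dsimp only
  rw [if_pos hb]

theorem fixB_step_not (st : List String × List String × List String) (k : Int) (b : String)
    (hb : pvImp b = false) :
    fixB_step st (k, b) =
      ((fixB_flush st.1 st.2.1 st.2.2 k).1 ++ [b], [], (fixB_flush st.1 st.2.1 st.2.2 k).2) := by
  unfold pvImp at hb
  rw [fixB_step]
  dsimp only
  rw [if_neg (by simpa using hb)]

theorem foldB_imps (bs : List String) :
    ∀ (k : Int) (out blk fixes : List String), (∀ l ∈ bs, pvImp l = true) →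
      (PySem.List.enumerate bs k).foldl fixB_step (out, blk, fixes) = (out, blk ++ bs, fixes) := by
  induction bs with
  | nil => intro k out blk fixes _; simp [PySem.List.enumerate_nil]
  | cons b bs ih =>
    intro k out blk fixes hall
    rw [PySem.List.enumerate_cons, List.foldl_cons,
      fixB_step_imp _ _ _ (hall b (by simp)),
      ih (k + 1) out (blk ++ [b]) fixes (fun l hl => hall l (by simp [hl]))]
    simp

theorem fixB_flush_eq (out blk fixes : List String) (i : Nat) :
    fixB_flush out blk fixes ((i + blk.length : Nat) : Int) =
      (out ++ (pvFlush blk i).1, fixes ++ (pvFlush blk i).2) := by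
  rw [fixB_flush, pvFlush]
  by_cases h1 : blk.length > 1
  · rw [if_pos h1, if_pos h1]
    by_cases hd : blk = PySem.List.sorted blk (fun y => PySem.Str.strip y)
    · rw [if_neg (fun hh => hh hd.symm), if_neg (fun hh => hh hd)]
      simp
    · rw [if_pos (fun hh => hd hh.symm), if_pos hd]
      simp only [pvMsg]
      have hc : ((i + blk.length : Nat) : Int) - blk.length + 1 = (i : Int) + 1 := by
        push_cast; ring
      rw [hc]
  · rw [if_neg h1, if_neg h1]
    simp
theorem flush_nil (out fixes : List String) (k : Int) :
    fixB_flush out [] fixes k = (out, fixes) := by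
  rw [fixB_flush]
  simp

theorem foldB_eq (n : Nat) :
    ∀ (suffix : List String), suffix.length ≤ n → ∀ (i : Nat) (out fixes : List String),
      (fixB_flush ((PySem.List.enumerate suffix (i : Int)).foldl fixB_step (out, [], fixes)).1
          ((PySem.List.enumerate suffix (i : Int)).foldl fixB_step (out, [], fixes)).2.1
          ((PySem.List.enumerate suffix (i : Int)).foldl fixB_step (out, [], fixes)).2.2
          ((i + suffix.length : Nat) : Int)) =
        (out ++ (pvSpec suffix i).1, fixes ++ (pvSpec suffix i).2) := by
  induction n with
  | zero =>
    intro suffix hlen i out fixes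
    have : suffix = [] := List.eq_nil_of_length_eq_zero (by omega)
    subst this
    rw [PySem.List.enumerate_nil]
    simp only [List.foldl_nil]
    rw [flush_nil, pvSpec_nil]
    simp
  | succ n ih =>
    intro suffix hlen i out fixes
    match suffix with
    | [] =>
      rw [PySem.List.enumerate_nil]
      simp only [List.foldl_nil, List.length_nil, Nat.add_zero]
      rw [flush_nil, pvSpec_nil]
      simp
    | x :: rest =>
      by_cases hx : pvImp x = true
      · -- import head: consume the whole block B = x :: takeWhile
        have hT : ∀ l ∈ x :: rest.takeWhile pvImp, pvImp l = true := by
          intro l hl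
          rcases List.mem_cons.1 hl with h | h
          · exact h ▸ hx
          · exact List.mem_takeWhile_imp h
        have hsplit : x :: rest = (x :: rest.takeWhile pvImp) ++ rest.dropWhile pvImp := by
          simp [List.takeWhile_append_dropWhile]
        set B := x :: rest.takeWhile pvImp with hBdef
        set R := rest.dropWhile pvImp with hRdef
        have henum : PySem.List.enumerate (x :: rest) (i : Int) =
            PySem.List.enumerate B (i : Int) ++
              PySem.List.enumerate R ((i : Int) + B.length) := by
          rw [hsplit, PySem.List.enumerate_append]
        have hlenx : (x :: rest).length = B.length + R.length := by
          rw [hsplit, List.length_append]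
        rw [henum, List.foldl_append, foldB_imps B (i : Int) out [] fixes hT]
        simp only [List.nil_append]
        rw [pvSpec_cons_imp x rest i hx, ← hBdef, ← hRdef]
        rcases hR : R with _ | ⟨y, ys⟩
        · rw [PySem.List.enumerate_nil]
          simp only [List.foldl_nil]
          rw [show (i + (x :: rest).length : Nat) = i + B.length from by
            rw [hlenx, hR]; simp]
          rw [fixB_flush_eq, pvSpec_nil]
          simp
        · have hy : pvImp y = false := dropWhile_head_false pvImp rest y ys (hRdef.symm.trans hR)
          rw [PySem.List.enumerate_cons, List.foldl_cons, fixB_step_not _ _ _ hy]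
          have hcast : (i : Int) + B.length = ((i + B.length : Nat) : Int) := by push_cast; ring
          rw [hcast, fixB_flush_eq]
          have hcast2 : ((i + B.length : Nat) : Int) + 1 = ((i + B.length + 1 : Nat) : Int) := by
            push_cast; ring
          rw [hcast2]
          have hys : ys.length ≤ n := by
            have hBl : 1 ≤ B.length := by rw [hBdef]; simp
            have heq : rest.length + 1 = B.length + (ys.length + 1) := by
              have h5 := hlenx
              rw [hR] at h5
              simpa using h5
            have hlen' : rest.length + 1 ≤ n + 1 := by simpa using hlen
            omega
          have := ih ys hys (i + B.length + 1)
            ((out ++ (pvFlush B i).1) ++ [y]) (fixes ++ (pvFlush B i).2)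
          rw [show (i + (x :: rest).length : Nat) = i + B.length + 1 + ys.length from by
            rw [hlenx, hR]; simp; omega]
          rw [this]
          rw [pvSpec_cons_not y ys (i + B.length) hy]
          simp
      · -- non-import head: flush the (empty) block and append the line
        have hx' : pvImp x = false := eq_false_of_ne_true hx
        rw [PySem.List.enumerate_cons, List.foldl_cons, fixB_step_not _ _ _ hx', flush_nil]
        simp only []
        have hcast : (i : Int) + 1 = ((i + 1 : Nat) : Int) := by push_cast; ring
        rw [hcast]
        have := ih rest (by simpa using hlen) (i + 1) (out ++ [x]) fixes
        rw [show (i + (x :: rest).length : Nat) = i + 1 + rest.length from by simp; omega]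
        rw [this, pvSpec_cons_not x rest i hx']
        simp

-- ===== VERDICT (by name: the statement is the Claim_ definition above) =====
theorem fix_import_statements_spec : Claim_equal_fix_import_statements := by
  intro content _
  unfold Spec_fix_import_statements fix_import_statements fix_import_statements_alt
  dsimp only
  set lines := (PySem.Str.split? content "\n").getD [] with hlines
  rw [fixA_loop_eq]
  simp only [List.drop_zero, List.take_zero, List.nil_append]
  have hB := foldB_eq lines.length lines le_rfl 0 [] []
  simp only [Nat.cast_zero, Nat.zero_add, List.nil_append] at hB
  rw [hB]
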